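-- pv_equiv track=rewrite | github.com/alafa/theegg_ai | tarea_38/el_biologo/main.py | common_string
-- ===== SOURCE A (Python) =====
-- def common_string(s1, s2):
--     common_strings = []
--     common_str = ''
--
--     for pair_of_chars in list(zip(s1, s2)):
--         if pair_of_chars[0] == pair_of_chars[1]:
--             common_str = common_str + pair_of_chars[0]
--         else:
--             common_strings.append(common_str)
--             common_str = ''
--
--     common_strings.append(common_str)
--     if common_strings:
--         return max(common_strings, key=len)
--     else:
--         return ''
-- ===== SOURCE B (Python) =====
-- def common_string(s1, s2):
--     best = ''
--     while True:
--         n = min(len(s1), len(s2))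
--         i = 0
--         while i < n and s1[i] == s2[i]:
--             i += 1
--         if i > len(best):
--             best = s1[:i]
--         if i == n:
--             return best
--         s1, s2 = s1[i+1:], s2[i+1:]
-- ===== Notes on version B (the rewrite author's own statement) =====
-- stated objective: alternative
-- what changed: B works block-at-a-time: it repeatedly measures the matching prefix of the remaining string pair, keeps that prefix slice if strictly longer than the best so far, and cuts both strings past the mismatch; A instead walks character pairs accumulating every run into a list of strings and takes max(key=len) at the end.
import Mathlib
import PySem

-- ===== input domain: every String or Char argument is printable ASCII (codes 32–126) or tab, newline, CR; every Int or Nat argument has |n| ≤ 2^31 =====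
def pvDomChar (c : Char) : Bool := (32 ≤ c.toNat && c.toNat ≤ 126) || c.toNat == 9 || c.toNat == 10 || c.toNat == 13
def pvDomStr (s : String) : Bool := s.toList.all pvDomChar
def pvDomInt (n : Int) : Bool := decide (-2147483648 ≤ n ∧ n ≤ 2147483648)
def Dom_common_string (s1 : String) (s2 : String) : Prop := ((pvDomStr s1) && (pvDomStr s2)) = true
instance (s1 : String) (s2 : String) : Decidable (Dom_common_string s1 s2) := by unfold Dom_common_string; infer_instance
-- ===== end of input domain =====

-- B is an alternative block-at-a-time algorithm: it repeatedly strips the matching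
-- prefix of the remaining strings, keeps that prefix slice if strictly longer than the
-- best so far, and cuts past the mismatch; return values agree everywhere.

-- ===== PORT A =====
-- one loop step of A: extend the current run on a match, else bank it and restart
def csStepA (st : List (List Char) × List Char) (p : Char × Char) : List (List Char) × List Char :=
  if p.1 = p.2 then (st.1, st.2 ++ [p.1]) else (st.1 ++ [st.2], [])

def common_string (s1 : String) (s2 : String) : String :=
  let st := (s1.toList.zip s2.toList).foldl csStepA ([], [])
  let commonStrings := st.1 ++ [st.2]
  match PySem.List.max? commonStrings List.length with
  | some m => String.ofList m
  | none => ""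

-- ===== PORT B =====
-- B's inner while loop: length of the matching prefix of the two remaining strings
def csMatchLen : List Char → List Char → Nat
  | a :: t1, b :: t2 => if a = b then csMatchLen t1 t2 + 1 else 0
  | _, _ => 0

-- needed by csLoop's termination: the scan never passes min(len,len)
lemma csMatchLen_le : ∀ (l1 l2 : List Char), csMatchLen l1 l2 ≤ min l1.length l2.length := by
  intro l1
  induction l1 with
  | nil => intro l2; simp [csMatchLen]
  | cons a t1 ih =>
    intro l2
    cases l2 with
    | nil => simp [csMatchLen]
    | cons b t2 =>
      simp only [csMatchLen, List.length_cons]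
      split_ifs
      · have := ih t2; omega
      · omega

-- B's outer 'while True' loop; s1[:i] → take, s1[i+1:] → drop (both indices are ≥ 0, so
-- Python's slices are exactly take/drop here)
def csLoop (best l1 l2 : List Char) : List Char :=
  let n := min l1.length l2.length
  let i := csMatchLen l1 l2
  let best' := if best.length < i then l1.take i else best
  if i = n then best'
  else csLoop best' (l1.drop (i + 1)) (l2.drop (i + 1))
termination_by l1.length
decreasing_by
  have h := csMatchLen_le l1 l2
  simp only [List.length_drop]
  omega

def common_string_alt (s1 : String) (s2 : String) : String :=
  String.ofList (csLoop [] s1.toList s2.toList)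

-- ===== PRECONDITION & SPEC =====
def Spec_common_string (s1 : String) (s2 : String) (out : String) : Prop := out = common_string_alt s1 s2
instance (s1 : String) (s2 : String) (out : String) : Decidable (Spec_common_string s1 s2 out) := by unfold Spec_common_string; infer_instance

-- ===== CLAIM (what is proved, stated in full; the proofs are below) =====
def Claim_equal_common_string : Prop := ∀ (s1 : String) (s2 : String), Dom_common_string s1 s2 → Spec_common_string s1 s2 (common_string s1 s2)

-- ===== LEMMAS AND PROOFS =====

-- A's banked runs, starting from the empty state
def csRuns (l1 l2 : List Char) : List (List Char) :=
  let st := (l1.zip l2).foldl csStepA ([], [])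
  st.1 ++ [st.2]

-- the accumulator of A's fold is only appended to
lemma foldA_acc : ∀ (zs : List (Char × Char)) (acc : List (List Char)) (cur : List Char),
    zs.foldl csStepA (acc, cur)
      = (acc ++ (zs.foldl csStepA ([], cur)).1, (zs.foldl csStepA ([], cur)).2) := by
  intro zs
  induction zs with
  | nil => intro acc cur; simp
  | cons p t ih =>
    intro acc cur
    by_cases hp : p.1 = p.2
    · simp only [List.foldl_cons, csStepA, hp, if_pos]
      rw [← hp]
      exact ih acc (cur ++ [p.1])
    · simp only [List.foldl_cons, csStepA, hp, if_neg, not_false_iff, List.nil_append]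
      rw [ih (acc ++ [cur]) [], ih [cur] []]
      simp

-- A's fold processes exactly one block: the matching prefix, then (unless done) the mismatch
lemma foldA_block : ∀ (l1 l2 : List Char) (acc : List (List Char)) (cur : List Char),
    (l1.zip l2).foldl csStepA (acc, cur)
      = if csMatchLen l1 l2 = min l1.length l2.length
        then (acc, cur ++ l1.take (csMatchLen l1 l2))
        else ((l1.drop (csMatchLen l1 l2 + 1)).zip (l2.drop (csMatchLen l1 l2 + 1))).foldl
               csStepA (acc ++ [cur ++ l1.take (csMatchLen l1 l2)], []) := by
  intro l1
  induction l1 with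
  | nil => intro l2 acc cur; simp [csMatchLen]
  | cons a t1 ih =>
    intro l2 acc cur
    cases l2 with
    | nil => simp [csMatchLen]
    | cons b t2 =>
      by_cases hab : a = b
      · subst hab
        have h1 : csMatchLen (a :: t1) (a :: t2) = csMatchLen t1 t2 + 1 := by
          simp [csMatchLen]
        have hmin : min ((a :: t1).length) ((a :: t2).length)
            = min t1.length t2.length + 1 := by
          simp only [List.length_cons]; omega
        rw [h1, hmin]
        have hstep : ((a :: t1).zip (a :: t2)).foldl csStepA (acc, cur)
            = (t1.zip t2).foldl csStepA (acc, cur ++ [a]) := by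
          simp [csStepA]
        rw [hstep, ih t2 acc (cur ++ [a])]
        by_cases hc : csMatchLen t1 t2 = min t1.length t2.length
        · rw [if_pos hc, if_pos (by omega)]
          simp [List.take_succ_cons]
        · rw [if_neg hc, if_neg (by omega)]
          simp [List.take_succ_cons]
      · have h0 : csMatchLen (a :: t1) (b :: t2) = 0 := by
          simp [csMatchLen, hab]
        rw [h0]
        have hne : ¬ ((0 : Nat) = min ((a :: t1).length) ((b :: t2).length)) := by
          simp only [List.length_cons]; omega
        rw [if_neg hne]
        simp [csStepA, hab]

-- the run decomposition csLoop follows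
lemma csRuns_block (l1 l2 : List Char) :
    csRuns l1 l2
      = if csMatchLen l1 l2 = min l1.length l2.length
        then [l1.take (csMatchLen l1 l2)]
        else l1.take (csMatchLen l1 l2)
             :: csRuns (l1.drop (csMatchLen l1 l2 + 1)) (l2.drop (csMatchLen l1 l2 + 1)) := by
  unfold csRuns
  rw [foldA_block l1 l2 [] []]
  by_cases hc : csMatchLen l1 l2 = min l1.length l2.length
  · rw [if_pos hc, if_pos hc]
    simp
  · rw [if_neg hc, if_neg hc]
    rw [foldA_acc _ ([] ++ [[] ++ l1.take (csMatchLen l1 l2)]) []]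
    simp

-- one comparison step of max(key=len) with a running maximum (first wins ties)
def csMaxStep (m x : List Char) : List Char := if m.length < x.length then x else m

-- max? on a nonempty list is the running-maximum fold from its head
lemma maxq_cons : ∀ (l : List (List Char)) (x : List Char),
    PySem.List.max? (x :: l) List.length = some (l.foldl csMaxStep x) := by
  intro l
  induction l with
  | nil => intro x; rfl
  | cons y t ih =>
    intro x
    have h1 : PySem.List.max? (x :: y :: t) List.length
        = PySem.List.max? (csMaxStep x y :: t) List.length := by
      simp only [PySem.List.max?, List.foldl_cons, csMaxStep]
      split_ifs <;> rfl
    rw [h1, ih, List.foldl_cons]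

lemma csMaxStep_nil (x : List Char) : csMaxStep [] x = x := by
  cases x <;> simp [csMaxStep]

-- a leading empty candidate never changes the first length-maximum
lemma maxq_nil_cons (runs : List (List Char)) (h : runs ≠ []) :
    PySem.List.max? ([] :: runs) List.length = PySem.List.max? runs List.length := by
  cases runs with
  | nil => exact absurd rfl h
  | cons r0 rest =>
    rw [maxq_cons, maxq_cons, List.foldl_cons, csMaxStep_nil]

-- matching prefixes have length exactly csMatchLen
lemma take_matchLen_length (l1 l2 : List Char) :
    (l1.take (csMatchLen l1 l2)).length = csMatchLen l1 l2 := by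
  have := csMatchLen_le l1 l2
  simp only [List.length_take]
  omega

-- one unfolding of B's loop, with the local definitions substituted
lemma csLoop_eq (best l1 l2 : List Char) :
    csLoop best l1 l2 =
      if csMatchLen l1 l2 = min l1.length l2.length
      then (if best.length < csMatchLen l1 l2 then l1.take (csMatchLen l1 l2) else best)
      else csLoop (if best.length < csMatchLen l1 l2 then l1.take (csMatchLen l1 l2) else best)
        (l1.drop (csMatchLen l1 l2 + 1)) (l2.drop (csMatchLen l1 l2 + 1)) := by
  rw [csLoop]

-- B's loop computes the first length-maximum of best followed by A's runs
lemma csLoop_max_aux : ∀ (N : Nat) (best l1 l2 : List Char), l1.length ≤ N →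
    PySem.List.max? (best :: csRuns l1 l2) List.length = some (csLoop best l1 l2) := by
  intro N
  induction N with
  | zero =>
    intro best l1 l2 hN
    have hl1 : l1 = [] := by cases l1 <;> simp_all
    subst hl1
    have hc : csMatchLen [] l2 = min ([] : List Char).length l2.length := by
      simp [csMatchLen]
    rw [maxq_cons, csRuns_block, if_pos hc, List.foldl_cons, List.foldl_nil,
        csLoop_eq, if_pos hc]
    simp only [csMaxStep, take_matchLen_length]
  | succ N ih =>
    intro best l1 l2 hN
    by_cases hc : csMatchLen l1 l2 = min l1.length l2.length
    · rw [maxq_cons, csRuns_block, if_pos hc, List.foldl_cons, List.foldl_nil,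
          csLoop_eq, if_pos hc]
      simp only [csMaxStep, take_matchLen_length]
    · rw [maxq_cons, csRuns_block, if_neg hc, List.foldl_cons, csLoop_eq, if_neg hc]
      have hdrop : (l1.drop (csMatchLen l1 l2 + 1)).length ≤ N := by
        have := csMatchLen_le l1 l2
        simp only [List.length_drop]
        omega
      have h := ih (if best.length < csMatchLen l1 l2 then l1.take (csMatchLen l1 l2) else best) (l1.drop (csMatchLen l1 l2 + 1)) (l2.drop (csMatchLen l1 l2 + 1)) hdrop
      rw [maxq_cons] at h
      rw [← h]
      congr 1
      simp only [csMaxStep, take_matchLen_length]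

lemma csLoop_max (best l1 l2 : List Char) :
    PySem.List.max? (best :: csRuns l1 l2) List.length = some (csLoop best l1 l2) :=
  csLoop_max_aux l1.length best l1 l2 le_rfl

-- ===== VERDICT (by name: the statement is the Claim_ definition above) =====
theorem common_string_spec : Claim_equal_common_string := by
  intro s1 s2 _
  unfold Spec_common_string common_string common_string_alt
  have h := csLoop_max [] s1.toList s2.toList
  have hne : csRuns s1.toList s2.toList ≠ [] := by unfold csRuns; simp
  rw [maxq_nil_cons _ hne] at h
  show (match PySem.List.max? (csRuns s1.toList s2.toList) List.length with
        | some m => String.ofList m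
        | none => "") = _
  rw [h]
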